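-- pv_equiv track=rewrite | github.com/JDVanBus/Reto-1_chill | d_Maxima_suma.py | max_suma
-- ===== SOURCE A (Python) =====
-- def max_suma(lista_a:list) ->float:
--     suma_max = 0
--     for i in range(len(lista_a)):
--         for j in range(i + 1, len(lista_a)):
--             suma_actual = lista_a[i] + lista_a[j]
--             if suma_actual > suma_max:
--                 suma_max = suma_actual
--     return suma_max
-- ===== SOURCE B (Python) =====
-- def max_suma(lista_a: list) -> float:
--     # One pass: keep the running maximum element and the best pair sum so far.
--     best = 0
--     m = None
--     for x in lista_a:
--         if m is None:
--             m = x
--         else: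
--             if m + x > best:
--                 best = m + x
--             if x > m:
--                 m = x
--     return best
-- ===== Notes on version B (the rewrite author's own statement) =====
-- stated objective: faster
-- what changed: Replaces the O(n^2) scan over all index pairs by a single pass that maintains the running maximum element and the best pair sum seen so far.
import Mathlib
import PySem

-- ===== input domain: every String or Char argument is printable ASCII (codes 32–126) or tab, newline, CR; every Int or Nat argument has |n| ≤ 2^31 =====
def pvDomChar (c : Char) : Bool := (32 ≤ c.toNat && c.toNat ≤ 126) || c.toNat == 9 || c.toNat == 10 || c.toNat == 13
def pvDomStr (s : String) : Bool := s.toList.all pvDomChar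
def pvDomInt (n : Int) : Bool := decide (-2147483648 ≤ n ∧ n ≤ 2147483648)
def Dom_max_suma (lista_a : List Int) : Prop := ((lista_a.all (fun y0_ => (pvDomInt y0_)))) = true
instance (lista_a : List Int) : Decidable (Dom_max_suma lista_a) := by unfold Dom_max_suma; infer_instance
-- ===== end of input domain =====

-- B replaces A's quadratic all-pairs scan by a single pass keeping the running maximum
-- element and the best pair sum so far (objective: faster, O(n) vs O(n^2)).

-- ===== PORT A =====
def max_suma (lista_a : List Int) : Int :=
  (PySem.List.pyRange 0 (lista_a.length : Int) 1).foldl (fun suma_max i =>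
    (PySem.List.pyRange (i + 1) (lista_a.length : Int) 1).foldl (fun suma_max j =>
      let suma_actual := PySem.List.pyGetD lista_a i 0 + PySem.List.pyGetD lista_a j 0
      if suma_max < suma_actual then suma_actual else suma_max) suma_max) 0

-- ===== PORT B =====
def pvStep (st : Int × Option Int) (x : Int) : Int × Option Int :=
  match st.2 with
  | none => (st.1, some x)
  | some m => (if st.1 < m + x then m + x else st.1,
               if m < x then some x else some m)

def max_suma_alt (lista_a : List Int) : Int :=
  (lista_a.foldl pvStep (0, none)).1

-- ===== PRECONDITION & SPEC =====
def Spec_max_suma (lista_a : List Int) (out : Int) : Prop := out = max_suma_alt lista_a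
instance (lista_a : List Int) (out : Int) : Decidable (Spec_max_suma lista_a out) := by unfold Spec_max_suma; infer_instance

-- ===== CLAIM (what is proved, stated in full; the proofs are below) =====
def Claim_equal_max_suma : Prop := ∀ (lista_a : List Int), Dom_max_suma lista_a → Spec_max_suma lista_a (max_suma lista_a)

-- ===== LEMMAS AND PROOFS =====

/-- All pair sums l[i]+l[j], i < j, as a list. -/
def pvPairs : List Int → List Int
  | [] => []
  | x :: xs => xs.map (x + ·) ++ pvPairs xs

/-- Running max, seeded. -/
def pvSmax (s : Int) (L : List Int) : Int := L.foldl max s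

theorem pvSmax_append (s : Int) (A B : List Int) :
    pvSmax s (A ++ B) = pvSmax (pvSmax s A) B := by
  simp [pvSmax, List.foldl_append]

theorem pvSmax_le {s t : Int} {L : List Int} (h1 : s ≤ t) (h2 : ∀ y ∈ L, y ≤ t) :
    pvSmax s L ≤ t := by
  rcases PySem.List.foldl_max_mem L s with h | h
  · rw [pvSmax, h]; exact h1
  · exact h2 _ h

theorem pvLe_smax (s : Int) (L : List Int) : s ≤ pvSmax s L :=
  (PySem.List.le_foldl_max L s).1

theorem pvMem_le_smax {y : Int} {L : List Int} (s : Int) (hy : y ∈ L) : y ≤ pvSmax s L :=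
  (PySem.List.le_foldl_max L s).2 y hy

/-- Folding with `max` of two shifted copies equals folding the pointwise-max shift. -/
theorem pvSmax_max_shift (m x s : Int) (ys : List Int) :
    pvSmax s (ys.map (max m x + ·)) =
      pvSmax (pvSmax s (ys.map (m + ·))) (ys.map (x + ·)) := by
  apply le_antisymm
  · apply pvSmax_le
    · exact le_trans (pvLe_smax s _) (pvLe_smax _ _)
    · intro y hy
      rcases List.mem_map.mp hy with ⟨z, hz, rfl⟩
      rcases max_cases m x with ⟨he, _⟩ | ⟨he, _⟩
      · rw [he]
        exact le_trans (pvMem_le_smax s (List.mem_map_of_mem hz)) (pvLe_smax _ _)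
      · rw [he]
        exact pvMem_le_smax _ (List.mem_map_of_mem hz)
  · apply pvSmax_le
    · apply pvSmax_le
      · exact pvLe_smax s _
      · intro y hy
        rcases List.mem_map.mp hy with ⟨z, hz, rfl⟩
        exact le_trans (by have := le_max_left m x; linarith)
          (pvMem_le_smax s (List.mem_map_of_mem hz))
    · intro y hy
      rcases List.mem_map.mp hy with ⟨z, hz, rfl⟩
      exact le_trans (by have := le_max_right m x; linarith)
        (pvMem_le_smax s (List.mem_map_of_mem hz))

/-- A's inner loop over j (as a fold over the suffix of the list) is a seeded running max. -/
theorem pvInner_eq_smax (s x : Int) (xs : List Int) :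
    xs.foldl (fun sm y => if sm < x + y then x + y else sm) s = pvSmax s (xs.map (x + ·)) := by
  induction xs generalizing s with
  | nil => simp [pvSmax]
  | cons y ys ih =>
    simp only [List.foldl_cons, List.map_cons, pvSmax] at *
    rw [ih]
    congr 1
    rcases lt_or_ge s (x + y) with h | h
    · simp [h, max_eq_right (le_of_lt h)]
    · simp [not_lt.mpr h, max_eq_left h]

/-- A's double loop, rephrased on list suffixes. -/
def pvG (s : Int) : List Int → Int
  | [] => s
  | x :: xs => pvG (xs.foldl (fun sm y => if sm < x + y then x + y else sm) s) xs

theorem pvG_eq_smax_pairs (s : Int) (l : List Int) : pvG s l = pvSmax s (pvPairs l) := by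
  induction l generalizing s with
  | nil => simp [pvG, pvPairs, pvSmax]
  | cons x xs ih =>
    rw [pvG, ih, pvPairs, pvSmax_append, pvInner_eq_smax]

/-- The indexed outer loop of port A computes `pvG` on the corresponding suffix. -/
theorem pvOuter_eq_pvG (l : List Int) (a : Nat) (s : Int) :
    (PySem.List.pyRange (a : Int) (l.length : Int) 1).foldl (fun suma_max i =>
      (PySem.List.pyRange (i + 1) (l.length : Int) 1).foldl (fun suma_max j =>
        let suma_actual := PySem.List.pyGetD l i 0 + PySem.List.pyGetD l j 0
        if suma_max < suma_actual then suma_actual else suma_max) suma_max) s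
      = pvG s (l.drop a) := by
  by_cases ha : a < l.length
  · have hcons : PySem.List.pyRange (a : Int) (l.length : Int) 1
        = (a : Int) :: PySem.List.pyRange ((a : Int) + 1) (l.length : Int) 1 :=
      PySem.List.pyRange_one_cons (by exact_mod_cast ha)
    rw [hcons, List.foldl_cons]
    have hdrop : l.drop a = l[a] :: l.drop (a + 1) := List.drop_eq_getElem_cons ha
    have hx : PySem.List.pyGetD l (a : Int) 0 = l[a] :=
      PySem.List.pyGetD_ofNat l a 0 ha
    have hinner : ∀ sm : Int,
        (PySem.List.pyRange ((a : Int) + 1) (l.length : Int) 1).foldl (fun suma_max j =>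
          let suma_actual := PySem.List.pyGetD l (a : Int) 0 + PySem.List.pyGetD l j 0
          if suma_max < suma_actual then suma_actual else suma_max) sm
          = (l.drop (a + 1)).foldl (fun sm y => if sm < l[a] + y then l[a] + y else sm) sm := by
      intro sm
      have := PySem.List.foldl_pyRange_pyGetD' (xs := l) (a := (a : Int) + 1) (d := 0)
        (f := fun sm y => if sm < l[a] + y then l[a] + y else sm) (init := sm)
        (by positivity)
      simp only [hx]
      rw [show ((a : Int) + 1) = ((a + 1 : Nat) : Int) by push_cast; ring] at this ⊢
      rw [this]
      simp
    have ih := pvOuter_eq_pvG l (a + 1)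
      ((l.drop (a + 1)).foldl (fun sm y => if sm < l[a] + y then l[a] + y else sm) s)
    rw [show ((a : Int) + 1) = ((a + 1 : Nat) : Int) by push_cast; ring]
    rw [hdrop, pvG]
    rw [← ih]
    congr 1
    exact hinner s
  · have hnil : PySem.List.pyRange (a : Int) (l.length : Int) 1 = [] :=
      PySem.List.pyRange_one_eq_nil (by exact_mod_cast Nat.le_of_not_lt ha)
    rw [hnil, List.drop_eq_nil_of_le (Nat.le_of_not_lt ha)]
    simp [pvG]
termination_by l.length - a

theorem pvA_eq_smax_pairs (l : List Int) : max_suma l = pvSmax 0 (pvPairs l) := by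
  have := pvOuter_eq_pvG l 0 0
  simp only [Nat.cast_zero, List.drop_zero] at this
  rw [max_suma, this, pvG_eq_smax_pairs]

/-- Invariant of B's single pass: with running max `m` and best `best`, folding the rest
    of the list yields the seeded max over all remaining pair sums involving `m`. -/
theorem pvStep_some (best m x : Int) :
    pvStep (best, some m) x = (max best (m + x), some (max m x)) := by
  have e1 : (if best < m + x then m + x else best) = max best (m + x) := by
    rcases lt_or_ge best (m + x) with h | h
    · rw [if_pos h, max_eq_right (le_of_lt h)]
    · rw [if_neg (not_lt.mpr h), max_eq_left h]
  have e2 : (if m < x then some x else some m) = some (max m x) := by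
    rcases lt_or_ge m x with h | h
    · rw [if_pos h, max_eq_right (le_of_lt h)]
    · rw [if_neg (not_lt.mpr h), max_eq_left h]
  simp [pvStep, e1, e2]

/-- Invariant of B's single pass: with running max `m` and best `best`, folding the rest
    of the list yields the seeded max over all remaining pair sums involving `m`. -/
theorem pvB_invariant (xs : List Int) : ∀ (m best : Int),
    (xs.foldl pvStep (best, some m)).1
      = pvSmax best (xs.map (m + ·) ++ pvPairs xs) := by
  induction xs with
  | nil => intro m best; simp [pvPairs, pvSmax]
  | cons x xs ih =>
    intro m best
    rw [List.foldl_cons, pvStep_some, ih]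
    rw [pvPairs, List.map_cons]
    have hcons : ∀ (s y : Int) (L : List Int), pvSmax s (y :: L) = pvSmax (max s y) L :=
      fun _ _ _ => rfl
    rw [List.cons_append, hcons, pvSmax_append, pvSmax_append, pvSmax_append, pvSmax_max_shift]

theorem pvB_eq_smax_pairs (l : List Int) : max_suma_alt l = pvSmax 0 (pvPairs l) := by
  cases l with
  | nil => simp [max_suma_alt, pvPairs, pvSmax]
  | cons x xs =>
    rw [max_suma_alt, List.foldl_cons]
    have h0 : pvStep ((0 : Int), (none : Option Int)) x = ((0 : Int), some x) := rfl
    rw [h0, pvB_invariant, pvPairs]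

-- ===== VERDICT (by name: the statement is the Claim_ definition above) =====
theorem max_suma_spec : Claim_equal_max_suma := by
  intro l _
  unfold Spec_max_suma
  rw [pvA_eq_smax_pairs, pvB_eq_smax_pairs]
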